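-- pv_equiv track=rewrite | github.com/Ethan-Yang0101/Resume-BERT-NER-Project | project_label_studio/project_tool/project_processor.py | recover_data
-- ===== SOURCE A (Python) =====
-- def recover_data(txt_list, token_list, tag_list, cell_list):
--     '''将列表还原为句子形式'''
--     txts_list, txts = [], []
--     tokens_list, tokens = [], []
--     tags_list, tags = [], []
--     cells_list, cells = [], []
--     txt_token_tag_cell = zip(txt_list, token_list, tag_list, cell_list)
--     for txt, token, tag, cell in txt_token_tag_cell:
--         txts.append(txt)
--         tokens.append(token)
--         tags.append(tag)
--         cells.append(cell)
--         if txt == '[line]':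
--             txts_list.append(txts)
--             tokens_list.append(tokens)
--             tags_list.append(tags)
--             cells_list.append(cells)
--             txts, tokens, tags, cells = [], [], [], []
--     return txts_list, tokens_list, tags_list, cells_list
-- ===== SOURCE B (Python) =====
-- def recover_data(txt_list, token_list, tag_list, cell_list):
--     '''Truncate to the shortest list (zip semantics), then repeatedly cut all
--     four lists at the next '[line]' marker; the markerless tail is dropped.'''
--     n = min(len(txt_list), len(token_list), len(tag_list), len(cell_list))
--     txts = txt_list[:n]
--     tokens = token_list[:n]
--     tags = tag_list[:n]
--     cells = cell_list[:n]
--     txts_list, tokens_list, tags_list, cells_list = [], [], [], []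
--     while '[line]' in txts:
--         k = txts.index('[line]') + 1
--         txts_list.append(txts[:k]); txts = txts[k:]
--         tokens_list.append(tokens[:k]); tokens = tokens[k:]
--         tags_list.append(tags[:k]); tags = tags[k:]
--         cells_list.append(cells[:k]); cells = cells[k:]
--     return txts_list, tokens_list, tags_list, cells_list
-- ===== Notes on version B (the rewrite author's own statement) =====
-- stated objective: alternative
-- what changed: A scans the zipped lists element-by-element with four growing accumulator buffers; B first truncates all four lists to the shortest length, then repeatedly finds the next '[line]' marker and cuts all four lists there by slicing, so the segments are produced by search-and-split instead of element-wise accumulation.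
import Mathlib
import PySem

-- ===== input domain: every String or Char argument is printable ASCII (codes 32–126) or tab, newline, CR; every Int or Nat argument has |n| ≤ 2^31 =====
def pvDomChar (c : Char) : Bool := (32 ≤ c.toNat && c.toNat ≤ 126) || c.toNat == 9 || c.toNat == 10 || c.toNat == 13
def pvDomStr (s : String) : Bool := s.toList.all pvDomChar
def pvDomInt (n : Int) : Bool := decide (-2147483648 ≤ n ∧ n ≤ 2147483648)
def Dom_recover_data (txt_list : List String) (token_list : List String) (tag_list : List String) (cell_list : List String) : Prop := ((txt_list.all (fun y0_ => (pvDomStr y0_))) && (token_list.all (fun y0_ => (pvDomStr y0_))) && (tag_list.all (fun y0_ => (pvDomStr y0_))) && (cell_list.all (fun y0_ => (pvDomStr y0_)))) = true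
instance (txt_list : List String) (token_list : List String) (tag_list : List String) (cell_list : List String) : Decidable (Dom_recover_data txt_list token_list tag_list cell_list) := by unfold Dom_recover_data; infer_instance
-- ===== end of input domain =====

-- B replaces A's element-wise scan with four accumulator buffers by truncate-to-shortest
-- followed by repeated find-next-'[line]'-and-cut slicing; alternative decomposition, same cost class.

-- ===== PORT A =====
-- A's for-loop over zip(txt,token,tag,cell): structural recursion over the four lists
-- simultaneously (stops when any is exhausted, exactly zip's truncation), carrying the
-- four finished-segment lists aT…aC and the four current buffers T…C.
def goA (ts ks gs cs : List String)
    (aT aK aG aC : List (List String)) (T K G C : List String) :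
    List (List String) × List (List String) × List (List String) × List (List String) :=
  match ts, ks, gs, cs with
  | t :: ts, k :: ks, g :: gs, c :: cs =>
    let T' := T ++ [t]
    let K' := K ++ [k]
    let G' := G ++ [g]
    let C' := C ++ [c]
    if t == "[line]" then
      goA ts ks gs cs (aT ++ [T']) (aK ++ [K']) (aG ++ [G']) (aC ++ [C']) [] [] [] []
    else
      goA ts ks gs cs aT aK aG aC T' K' G' C'
  | _, _, _, _ => (aT, aK, aG, aC)

def recover_data (txt_list : List String) (token_list : List String) (tag_list : List String) (cell_list : List String) : List (List String) × List (List String) × List (List String) × List (List String) :=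
  goA txt_list token_list tag_list cell_list [] [] [] [] [] [] [] []

-- ===== PORT B =====
-- Source B's while-loop: find the next '[line]', cut all four lists there.
-- txts.index('[line]') under the membership test is PySem.List.index? (a some, so getD is exact);
-- the slices xs[:k] / xs[k:] with 0 ≤ k are exactly List.take k / List.drop k.
def splitB (txts tokens tags cells : List String) :
    List (List String) × List (List String) × List (List String) × List (List String) :=
  if h : "[line]" ∈ txts then
    let k := (PySem.List.index? txts "[line]").getD 0 + 1
    let r := splitB (txts.drop k) (tokens.drop k) (tags.drop k) (cells.drop k)
    (txts.take k :: r.1, tokens.take k :: r.2.1, tags.take k :: r.2.2.1, cells.take k :: r.2.2.2)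
  else ([], [], [], [])
termination_by txts.length
decreasing_by
  simp only [List.length_drop]
  have : txts ≠ [] := by rintro rfl; simp at h
  have := List.length_pos_iff.mpr this
  omega

-- min(a,b,c,d) is min(min(min(a,b),c),d); xs[:n] with 0 ≤ n is List.take n.
def recover_data_alt (txt_list : List String) (token_list : List String) (tag_list : List String) (cell_list : List String) : List (List String) × List (List String) × List (List String) × List (List String) :=
  let n := ((txt_list.length.min token_list.length).min tag_list.length).min cell_list.length
  splitB (txt_list.take n) (token_list.take n) (tag_list.take n) (cell_list.take n)

-- ===== PRECONDITION & SPEC =====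
def Spec_recover_data (txt_list : List String) (token_list : List String) (tag_list : List String) (cell_list : List String) (out : List (List String) × List (List String) × List (List String) × List (List String)) : Prop := out = recover_data_alt txt_list token_list tag_list cell_list
instance (txt_list : List String) (token_list : List String) (tag_list : List String) (cell_list : List String) (out : List (List String) × List (List String) × List (List String) × List (List String)) : Decidable (Spec_recover_data txt_list token_list tag_list cell_list out) := by unfold Spec_recover_data; infer_instance

-- ===== CLAIM (what is proved, stated in full; the proofs are below) =====
def Claim_equal_recover_data : Prop := ∀ (txt_list : List String) (token_list : List String) (tag_list : List String) (cell_list : List String), Dom_recover_data txt_list token_list tag_list cell_list → Spec_recover_data txt_list token_list tag_list cell_list (recover_data txt_list token_list tag_list cell_list)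

-- ===== LEMMAS AND PROOFS =====

-- Reference function: A's loop with the finished-segment accumulators stripped off
-- (they are only an append on the left), still carrying the current buffers T…C.
def F (ts ks gs cs : List String) (T K G C : List String) :
    List (List String) × List (List String) × List (List String) × List (List String) :=
  match ts, ks, gs, cs with
  | t :: ts, k :: ks, g :: gs, c :: cs =>
    if t == "[line]" then
      let r := F ts ks gs cs [] [] [] []
      ((T ++ [t]) :: r.1, (K ++ [k]) :: r.2.1, (G ++ [g]) :: r.2.2.1, (C ++ [c]) :: r.2.2.2)
    else
      F ts ks gs cs (T ++ [t]) (K ++ [k]) (G ++ [g]) (C ++ [c])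
  | _, _, _, _ => ([], [], [], [])

-- prepend T to the first segment (if any)
def consApp (T : List String) : List (List String) → List (List String)
  | [] => []
  | s :: ss => (T ++ s) :: ss

theorem consApp_nil (l : List (List String)) : consApp [] l = l := by
  cases l <;> simp [consApp]

theorem goA_eq_F (ts : List String) : ∀ (ks gs cs : List String)
    (aT aK aG aC : List (List String)) (T K G C : List String),
    goA ts ks gs cs aT aK aG aC T K G C =
      (aT ++ (F ts ks gs cs T K G C).1,
       aK ++ (F ts ks gs cs T K G C).2.1,
       aG ++ (F ts ks gs cs T K G C).2.2.1,
       aC ++ (F ts ks gs cs T K G C).2.2.2) := by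
  induction ts with
  | nil => intro ks gs cs aT aK aG aC T K G C; simp [goA, F]
  | cons t ts ih =>
    intro ks gs cs aT aK aG aC T K G C
    cases ks with
    | nil => simp [goA, F]
    | cons k ks =>
      cases gs with
      | nil => simp [goA, F]
      | cons g gs =>
        cases cs with
        | nil => simp [goA, F]
        | cons c cs =>
          by_cases ht : t = "[line]"
          · subst ht
            simp only [goA, F, beq_self_eq_true, if_true]
            rw [ih]
            simp
          · simp only [goA, F, beq_iff_eq, ht, if_false]
            rw [ih]

-- Truncating all four lists to the common length does not change F (zip truncation).
theorem F_trunc (ts : List String) : ∀ (ks gs cs T K G C : List String),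
    F (ts.take (((ts.length.min ks.length).min gs.length).min cs.length))
      (ks.take (((ts.length.min ks.length).min gs.length).min cs.length))
      (gs.take (((ts.length.min ks.length).min gs.length).min cs.length))
      (cs.take (((ts.length.min ks.length).min gs.length).min cs.length)) T K G C
      = F ts ks gs cs T K G C := by
  induction ts with
  | nil => intro ks gs cs T K G C; simp [F]
  | cons t ts ih =>
    intro ks gs cs T K G C
    cases ks with
    | nil => simp [F]
    | cons k ks =>
      cases gs with
      | nil => simp [F]
      | cons g gs =>
        cases cs with
        | nil => simp [F]
        | cons c cs =>
          have hmin : ((((t :: ts).length.min (k :: ks).length).min (g :: gs).length).min (c :: cs).length)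
              = (((ts.length.min ks.length).min gs.length).min cs.length) + 1 := by
            simp [List.length_cons, Nat.succ_min_succ]
          rw [hmin]
          simp only [List.take_succ_cons, F]
          by_cases ht : t = "[line]"
          · subst ht
            simp only [beq_self_eq_true, if_true]
            rw [ih]
          · simp only [beq_iff_eq, ht, if_false]
            rw [ih]

-- On four lists of equal length, F is splitB with the current buffers prepended
-- to the first segment.
theorem F_eq_splitB (n : Nat) : ∀ (ts ks gs cs T K G C : List String),
    ts.length = n → ks.length = n → gs.length = n → cs.length = n →
    F ts ks gs cs T K G C =
      (consApp T (splitB ts ks gs cs).1,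
       consApp K (splitB ts ks gs cs).2.1,
       consApp G (splitB ts ks gs cs).2.2.1,
       consApp C (splitB ts ks gs cs).2.2.2) := by
  induction n with
  | zero =>
    intro ts ks gs cs T K G C hts hks hgs hcs
    rw [List.length_eq_zero_iff] at hts hks hgs hcs
    subst hts; subst hks; subst hgs; subst hcs
    rw [splitB]; simp [F, consApp]
  | succ n ih =>
    intro ts ks gs cs T K G C hts hks hgs hcs
    match ts, ks, gs, cs with
    | t :: ts, k :: ks, g :: gs, c :: cs =>
      simp only [List.length_cons, Nat.add_right_cancel_iff] at hts hks hgs hcs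
      by_cases ht : t = "[line]"
      · subst ht
        have hmem : "[line]" ∈ "[line]" :: ts := List.mem_cons_self
        rw [splitB]
        simp only [hmem, dif_pos, PySem.List.index?_cons_self, Option.getD_some,
          List.take_succ_cons, List.take_zero, List.drop_succ_cons, List.drop_zero]
        simp only [F, beq_self_eq_true, if_true]
        rw [ih ts ks gs cs [] [] [] [] hts hks hgs hcs]
        simp only [consApp_nil]
        simp [consApp]
      · by_cases hm : "[line]" ∈ ts
        · -- the marker is further on: both sides cut at position idx+1
          obtain ⟨j, hj⟩ := Option.isSome_iff_exists.mp
            ((PySem.List.index?_isSome_iff ts "[line]").mpr hm)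
          have hidx : PySem.List.index? (t :: ts) "[line]" = some (j + 1) := by
            rw [PySem.List.index?_cons_of_ne ts ht, hj]; rfl
          have hmem' : "[line]" ∈ t :: ts := List.mem_cons_of_mem _ hm
          rw [splitB]
          simp only [hmem', dif_pos, hidx, Option.getD_some]
          simp only [F, beq_iff_eq, ht, if_false]
          rw [ih ts ks gs cs (T ++ [t]) (K ++ [k]) (G ++ [g]) (C ++ [c]) hts hks hgs hcs]
          rw [splitB]
          simp only [hm, dif_pos, hj, Option.getD_some]
          simp [consApp, List.take_succ_cons, List.drop_succ_cons]
        · -- no marker anywhere: both sides produce nothing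
          have hmem' : "[line]" ∉ t :: ts := by
            intro hc
            rcases List.mem_cons.mp hc with h | h
            · exact ht h.symm
            · exact hm h
          rw [splitB]; simp only [hmem', dif_neg, not_false_iff]
          simp only [F, beq_iff_eq, ht, if_false]
          rw [ih ts ks gs cs (T ++ [t]) (K ++ [k]) (G ++ [g]) (C ++ [c]) hts hks hgs hcs]
          rw [splitB]
          simp [hm, consApp]

-- ===== VERDICT (by name: the statement is the Claim_ definition above) =====
theorem recover_data_spec : Claim_equal_recover_data := by
  intro a b c d _
  unfold Spec_recover_data recover_data
  simp only [recover_data_alt]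
  rw [goA_eq_F, ← F_trunc a b c d [] [] [] []]
  rw [F_eq_splitB (((a.length.min b.length).min c.length).min d.length) _ _ _ _ [] [] [] []
    (by simp) (by simp) (by simp) (by simp)]
  simp only [consApp_nil, List.nil_append]
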